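-- pv_equiv track=rewrite | github.com/jyoung88888/crain_safety_system | ai_server/rtsp_service/lib/zone_utils.py | aggregate_max_cross_zone
-- ===== SOURCE A (Python) =====
-- def aggregate_max(cam_data, zones, keys):
--     """각 카메라의 카운트를 MAX로 집계 (중복 카운팅 방지)."""
--     agg = {z: {k: 0 for k in keys} for z in zones}
--     for z in zones:
--         for k in keys:
--             values = [cam_data[cid][z][k] for cid in cam_data if z in cam_data[cid]]
--             if values:
--                 agg[z][k] = max(values)
--     return agg
--
-- def aggregate_max_cross_zone(cam_data, zones, keys):
--     """기본 MAX 집계 후, zone1과 zone2의 person을 상호 합산.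
--
--     1층 1명 + 2층 1명 = 양쪽 모두 2명으로 판단.
--     호이스트가 1~2층을 오가므로 전체 인원으로 안전 판단해야 함.
--     """
--     agg = aggregate_max(cam_data, zones, keys)
--
--     if 1 not in zones or 2 not in zones:
--         return agg
--
--     z1 = agg.get(1, {})
--     z2 = agg.get(2, {})
--
--     person_keys = ["person_with_helmet", "person_no_helmet"]
--     total = {}
--     for k in person_keys:
--         total[k] = z1.get(k, 0) + z2.get(k, 0)
--
--     for z in [1, 2]:
--         if z not in agg:
--             agg[z] = {k: 0 for k in keys}
--         for k in person_keys:
--             agg[z][k] = total[k]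
--
--     return agg
-- ===== SOURCE B (Python) =====
-- def aggregate_max_cross_zone(cam_data, zones, keys):
--     """Camera-first single accumulating pass (running maximum, with a seen-zone
--     marker so zones no camera covers keep the 0 default even for negative counts),
--     then the person-key cross-sum for zones 1 and 2 computed key-by-key."""
--     agg = {z: {k: 0 for k in keys} for z in zones}
--     seen_zones = set()
--     for cid in cam_data:
--         zmap = cam_data[cid]
--         for z in zones:
--             if z in zmap:
--                 row = zmap[z]
--                 if z in seen_zones:
--                     for k in keys:
--                         v = row[k]
--                         if v > agg[z][k]:
--                             agg[z][k] = v
--                 else: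
--                     for k in keys:
--                         agg[z][k] = row[k]
--                     seen_zones.add(z)
--     if 1 in zones and 2 in zones:
--         for k in ["person_with_helmet", "person_no_helmet"]:
--             t = agg[1].get(k, 0) + agg[2].get(k, 0)
--             agg[1][k] = t
--             agg[2][k] = t
--     return agg
-- ===== Notes on version B (the rewrite author's own statement) =====
-- stated objective: alternative
-- what changed: aggregate_max's per-(zone,key) list-comprehension scans over all cameras are replaced by a single camera-first accumulating pass that folds each reading into a running maximum (a seen-zone marker keeps the 0 default for uncovered zones even with negative counts), and the cross-zone person totals are computed key-by-key in one loop instead of via a separate total dict and per-zone rewrite loops.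
import Mathlib
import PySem

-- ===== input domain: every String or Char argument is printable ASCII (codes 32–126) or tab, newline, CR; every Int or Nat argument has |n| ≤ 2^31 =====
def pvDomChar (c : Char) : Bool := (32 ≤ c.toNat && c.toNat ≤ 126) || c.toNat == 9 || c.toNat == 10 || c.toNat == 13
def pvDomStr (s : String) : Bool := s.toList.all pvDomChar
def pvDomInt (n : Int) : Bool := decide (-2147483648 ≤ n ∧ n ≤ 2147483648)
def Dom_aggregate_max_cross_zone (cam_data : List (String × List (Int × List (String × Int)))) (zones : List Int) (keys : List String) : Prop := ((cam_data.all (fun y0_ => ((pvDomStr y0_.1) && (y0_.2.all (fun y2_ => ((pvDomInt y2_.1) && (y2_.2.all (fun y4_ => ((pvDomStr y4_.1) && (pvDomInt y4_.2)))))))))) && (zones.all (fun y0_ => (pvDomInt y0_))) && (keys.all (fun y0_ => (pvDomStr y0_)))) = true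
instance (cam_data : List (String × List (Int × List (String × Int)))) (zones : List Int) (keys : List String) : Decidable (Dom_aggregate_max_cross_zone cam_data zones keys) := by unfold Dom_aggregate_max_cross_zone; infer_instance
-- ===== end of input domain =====

-- B replaces A's per-(zone,key) camera scans (each building a fresh values list)
-- by one accumulating camera-first pass with a running maximum (a seen-zone marker
-- keeps the 0 default for zones no camera covers) and folds the cross-zone person
-- totals key-by-key; a different decomposition of the same aggregation.

-- ===== PORT A =====
-- cam_data[cid] / zmap[z] / row[k] : first-match association-list lookup (Python dict)
def pvRow (cam_data : List (String × List (Int × List (String × Int)))) (cid : String) (z : Int) : Option (List (String × Int)) :=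
  (PySem.Dict.mk (((PySem.Dict.mk cam_data).get? cid).getD [])).get? z

-- values = [cam_data[cid][z][k] for cid in l if z in cam_data[cid]]  (l = cam_data in A)
def pvVals (cam_data l : List (String × List (Int × List (String × Int)))) (z : Int) (k : String) : List Int :=
  (l.filterMap (fun p => pvRow cam_data p.1 z)).map (fun row => ((PySem.Dict.mk row).get? k).getD 0)

-- {k: 0 for k in keys}
def pvZeroRow (keys : List String) : PySem.Dict String Int :=
  keys.foldl (fun r k => r.insert k 0) PySem.Dict.empty

-- {z: {k: 0 for k in keys} for z in zones}
def pvInitAgg (zones : List Int) (keys : List String) : PySem.Dict Int (PySem.Dict String Int) :=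
  zones.foldl (fun d z => d.insert z (pvZeroRow keys)) PySem.Dict.empty

def pvPersonKeys : List String := ["person_with_helmet", "person_no_helmet"]

-- body of A's inner loop: if values: agg[z][k] = max(values)
def azStep (cam_data : List (String × List (Int × List (String × Int)))) (z : Int)
    (agg : PySem.Dict Int (PySem.Dict String Int)) (k : String) : PySem.Dict Int (PySem.Dict String Int) :=
  let values := pvVals cam_data cam_data z k
  if values.isEmpty then agg
  else agg.insert z ((agg.getD z PySem.Dict.empty).insert k ((PySem.List.max? values (fun x => x)).getD 0))

def azAggregateMax (cam_data : List (String × List (Int × List (String × Int)))) (zones : List Int) (keys : List String) :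
    PySem.Dict Int (PySem.Dict String Int) :=
  zones.foldl (fun agg z => keys.foldl (azStep cam_data z) agg) (pvInitAgg zones keys)

-- A's cross-zone block (total dict first, then the two per-zone rewrite loops)
def azCross (keys : List String) (agg : PySem.Dict Int (PySem.Dict String Int)) : PySem.Dict Int (PySem.Dict String Int) :=
  let z1 := agg.getD 1 PySem.Dict.empty
  let z2 := agg.getD 2 PySem.Dict.empty
  let total := pvPersonKeys.foldl (fun t k => t.insert k (z1.getD k 0 + z2.getD k 0)) (PySem.Dict.empty : PySem.Dict String Int)
  ([1, 2] : List Int).foldl (fun agg z =>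
    let agg := if agg.contains z then agg else agg.insert z (pvZeroRow keys)
    pvPersonKeys.foldl (fun agg k => agg.insert z ((agg.getD z PySem.Dict.empty).insert k (total.getD k 0))) agg) agg

def aggregate_max_cross_zone (cam_data : List (String × List (Int × List (String × Int)))) (zones : List Int) (keys : List String) :
    List (Int × List (String × Int)) :=
  let agg := azAggregateMax cam_data zones keys
  let agg := if 1 ∈ zones ∧ 2 ∈ zones then azCross keys agg else agg
  agg.items.map (fun p => (p.1, p.2.items))

-- ===== PORT B =====
-- one zone of one camera: fold row into agg (max if the zone was seen, first write otherwise)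
def bzZoneStep (keys : List String) (zmap : List (Int × List (String × Int)))
    (st : PySem.Dict Int (PySem.Dict String Int) × PySem.Set Int) (z : Int) :
    PySem.Dict Int (PySem.Dict String Int) × PySem.Set Int :=
  match (PySem.Dict.mk zmap).get? z with
  | none => st
  | some row =>
    if z ∈ st.2 then
      (keys.foldl (fun agg k =>
         let v := ((PySem.Dict.mk row).get? k).getD 0
         if v > (agg.getD z PySem.Dict.empty).getD k 0 then
           agg.insert z ((agg.getD z PySem.Dict.empty).insert k v)
         else agg) st.1,
       st.2)
    else
      (keys.foldl (fun agg k =>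
         agg.insert z ((agg.getD z PySem.Dict.empty).insert k (((PySem.Dict.mk row).get? k).getD 0))) st.1,
       PySem.Set.add st.2 z)

def bzMain (cam_data : List (String × List (Int × List (String × Int)))) (zones : List Int) (keys : List String) :
    PySem.Dict Int (PySem.Dict String Int) × PySem.Set Int :=
  cam_data.foldl (fun st p => zones.foldl (bzZoneStep keys (((PySem.Dict.mk cam_data).get? p.1).getD [])) st)
    (pvInitAgg zones keys, ([] : PySem.Set Int))

-- B's cross-zone block: per person key, one total folded straight back into both zones
def bzCross (agg : PySem.Dict Int (PySem.Dict String Int)) : PySem.Dict Int (PySem.Dict String Int) :=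
  pvPersonKeys.foldl (fun agg k =>
    let t := (agg.getD 1 PySem.Dict.empty).getD k 0 + (agg.getD 2 PySem.Dict.empty).getD k 0
    let agg := agg.insert 1 ((agg.getD 1 PySem.Dict.empty).insert k t)
    agg.insert 2 ((agg.getD 2 PySem.Dict.empty).insert k t)) agg

def aggregate_max_cross_zone_alt (cam_data : List (String × List (Int × List (String × Int)))) (zones : List Int) (keys : List String) :
    List (Int × List (String × Int)) :=
  let agg := (bzMain cam_data zones keys).1
  let agg := if 1 ∈ zones ∧ 2 ∈ zones then bzCross agg else agg
  agg.items.map (fun p => (p.1, p.2.items))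

-- ===== PRECONDITION & SPEC =====
-- Pre_ excludes exactly the inputs on which the Python raises KeyError: some camera's
-- dict has a zone of `zones` whose row is missing one of `keys` (B raises there too).
def Pre_aggregate_max_cross_zone (cam_data : List (String × List (Int × List (String × Int)))) (zones : List Int) (keys : List String) : Prop :=
  (cam_data.all (fun p => zones.all (fun z =>
    match pvRow cam_data p.1 z with
    | none => true
    | some row => keys.all (fun k => ((PySem.Dict.mk row).get? k).isSome)))) = true
instance (cam_data : List (String × List (Int × List (String × Int)))) (zones : List Int) (keys : List String) : Decidable (Pre_aggregate_max_cross_zone cam_data zones keys) := by unfold Pre_aggregate_max_cross_zone; infer_instance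

def pvWitness_aggregate_max_cross_zone : (List (String × List (Int × List (String × Int)))) × List Int × List String :=
  ([("cam1", [(1, [("person_with_helmet", 2)])]), ("cam2", [(1, [("person_with_helmet", 1)]), (2, [("person_with_helmet", 3)])])],
   [1, 2], ["person_with_helmet"])

def Spec_aggregate_max_cross_zone (cam_data : List (String × List (Int × List (String × Int)))) (zones : List Int) (keys : List String) (out : List (Int × List (String × Int))) : Prop := out = aggregate_max_cross_zone_alt cam_data zones keys
instance (cam_data : List (String × List (Int × List (String × Int)))) (zones : List Int) (keys : List String) (out : List (Int × List (String × Int))) : Decidable (Spec_aggregate_max_cross_zone cam_data zones keys out) := by unfold Spec_aggregate_max_cross_zone; infer_instance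

-- ===== CLAIM (what is proved, stated in full; the proofs are below) =====
def Claim_equal_aggregate_max_cross_zone : Prop := ∀ (cam_data : List (String × List (Int × List (String × Int)))) (zones : List Int) (keys : List String), Dom_aggregate_max_cross_zone cam_data zones keys → Pre_aggregate_max_cross_zone cam_data zones keys → Spec_aggregate_max_cross_zone cam_data zones keys (aggregate_max_cross_zone cam_data zones keys)

-- ===== LEMMAS AND PROOFS =====

-- ---- generic single-cell update lemmas ----
theorem upd_getD (agg : PySem.Dict Int (PySem.Dict String Int)) (z : Int) (k : String) (v : Int) (z' : Int) (k' : String) :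
    (((agg.insert z ((agg.getD z PySem.Dict.empty).insert k v)).getD z' PySem.Dict.empty).getD k' 0)
      = if z' = z ∧ k' = k then v else (agg.getD z' PySem.Dict.empty).getD k' 0 := by
  rw [PySem.Dict.getD_insert]
  by_cases hz : z' = z
  · subst hz
    rw [if_pos rfl, PySem.Dict.getD_insert]
    by_cases hk : k' = k <;> simp [hk]
  · simp [hz]

theorem upd_keys (agg : PySem.Dict Int (PySem.Dict String Int)) (z : Int) (r : PySem.Dict String Int)
    (h : agg.contains z = true) : (agg.insert z r).keys = agg.keys :=
  PySem.Dict.keys_insert_of_contains _ _ h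

theorem upd_inner_keys (agg : PySem.Dict Int (PySem.Dict String Int)) (z : Int) (k : String) (v : Int) (z' : Int)
    (h : ((agg.getD z PySem.Dict.empty).contains k) = true) :
    ((agg.insert z ((agg.getD z PySem.Dict.empty).insert k v)).getD z' PySem.Dict.empty).keys
      = (agg.getD z' PySem.Dict.empty).keys := by
  rw [PySem.Dict.getD_insert]
  by_cases hz : z' = z
  · subst hz; rw [if_pos rfl, PySem.Dict.keys_insert_of_contains _ _ h]
  · simp [hz]

-- ---- structural invariant ----
def SInv (zones : List Int) (keys : List String) (agg : PySem.Dict Int (PySem.Dict String Int)) : Prop :=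
  agg.keys = PySem.Set.ofList zones ∧
  ∀ z : Int, (agg.getD z PySem.Dict.empty).keys = if z ∈ zones then PySem.Set.ofList keys else []

theorem contains_of_SInv {zones keys agg} (h : SInv zones keys agg) {z : Int} (hz : z ∈ zones) :
    agg.contains z = true := by
  rw [PySem.Dict.contains_eq_decide_mem_keys, h.1]
  simp [PySem.Set.mem_ofList, hz]

theorem not_contains_of_SInv {zones keys agg} (h : SInv zones keys agg) {z : Int} (hz : z ∉ zones) :
    agg.contains z = false := by
  rw [PySem.Dict.contains_eq_decide_mem_keys, h.1]
  simp [PySem.Set.mem_ofList, hz]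

theorem inner_contains_of_SInv {zones keys agg} (h : SInv zones keys agg) {z : Int} (hz : z ∈ zones)
    {k : String} (hk : k ∈ keys) : (agg.getD z PySem.Dict.empty).contains k = true := by
  rw [PySem.Dict.contains_eq_decide_mem_keys, h.2 z]
  simp [hz, PySem.Set.mem_ofList, hk]

theorem inner_not_contains_of_SInv {zones keys agg} (h : SInv zones keys agg) (z : Int)
    {k : String} (hk : k ∉ keys) : (agg.getD z PySem.Dict.empty).contains k = false := by
  rw [PySem.Dict.contains_eq_decide_mem_keys, h.2 z]
  by_cases hz : z ∈ zones <;> simp [hz, PySem.Set.mem_ofList, hk]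

theorem upd_SInv {zones keys agg} (h : SInv zones keys agg) {z : Int} (hz : z ∈ zones)
    {k : String} (hk : k ∈ keys) (v : Int) :
    SInv zones keys (agg.insert z ((agg.getD z PySem.Dict.empty).insert k v)) := by
  constructor
  · rw [upd_keys _ _ _ (contains_of_SInv h hz)]; exact h.1
  · intro z'
    rw [upd_inner_keys _ _ _ _ _ (inner_contains_of_SInv h hz hk)]
    exact h.2 z'

-- ---- init ----
theorem zeroRow_keys (keys : List String) : (pvZeroRow keys).keys = PySem.Set.ofList keys := by
  unfold pvZeroRow
  rw [PySem.Dict.keys_foldl_insert (f := fun _ _ => (0 : Int))]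
  simp [PySem.Set.update_nil_left]

theorem zeroRow_getD (keys : List String) (k : String) : (pvZeroRow keys).getD k 0 = 0 := by
  unfold pvZeroRow
  suffices h : ∀ (ks : List String) (r : PySem.Dict String Int), r.getD k 0 = 0 →
      (ks.foldl (fun r k => r.insert k 0) r).getD k 0 = 0 by
    exact h keys PySem.Dict.empty (by simp)
  intro ks
  induction ks with
  | nil => intro r hr; simpa using hr
  | cons a t ih =>
    intro r hr
    refine ih _ ?_
    rw [PySem.Dict.getD_insert]
    split_ifs <;> simp [hr]

theorem initAgg_getD (zones : List Int) (keys : List String) (z : Int) :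
    (pvInitAgg zones keys).getD z PySem.Dict.empty
      = if z ∈ zones then pvZeroRow keys else PySem.Dict.empty := by
  unfold pvInitAgg
  suffices h : ∀ (zs : List Int) (d : PySem.Dict Int (PySem.Dict String Int)),
      ((zs.foldl (fun d z => d.insert z (pvZeroRow keys)) d).getD z PySem.Dict.empty)
        = if z ∈ zs then pvZeroRow keys else d.getD z PySem.Dict.empty by
    rw [h]; split_ifs <;> simp
  intro zs
  induction zs with
  | nil => simp
  | cons a t ih =>
    intro d
    rw [List.foldl_cons, ih, PySem.Dict.getD_insert]
    by_cases hz : z = a <;> by_cases hm : z ∈ t <;> simp [hz, hm]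

theorem initAgg_keys (zones : List Int) (keys : List String) :
    (pvInitAgg zones keys).keys = PySem.Set.ofList zones := by
  unfold pvInitAgg
  rw [PySem.Dict.keys_foldl_insert (f := fun _ _ => pvZeroRow keys)]
  simp [PySem.Set.update_nil_left]

theorem initAgg_SInv (zones : List Int) (keys : List String) : SInv zones keys (pvInitAgg zones keys) := by
  refine ⟨initAgg_keys zones keys, fun z => ?_⟩
  rw [initAgg_getD]
  split_ifs with h <;> simp [zeroRow_keys]

-- ---- A-side characterization ----
def pvAMax (cam_data : List (String × List (Int × List (String × Int)))) (z : Int) (k : String) : Int :=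
  (PySem.List.max? (pvVals cam_data cam_data z k) (fun x => x)).getD 0

theorem azStep_getD (cam_data : List (String × List (Int × List (String × Int)))) (z : Int)
    (agg : PySem.Dict Int (PySem.Dict String Int)) (k : String) (z' : Int) (k' : String) :
    (((azStep cam_data z agg k).getD z' PySem.Dict.empty).getD k' 0)
      = if z' = z ∧ k' = k ∧ pvVals cam_data cam_data z' k' ≠ [] then pvAMax cam_data z' k'
        else (agg.getD z' PySem.Dict.empty).getD k' 0 := by
  unfold azStep
  by_cases he : (pvVals cam_data cam_data z k).isEmpty
  · rw [if_pos he]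
    have : ∀ (hz : z' = z) (hk : k' = k), pvVals cam_data cam_data z' k' = [] := by
      intro hz hk; subst hz; subst hk; simpa [List.isEmpty_iff] using he
    split_ifs with h
    · exact absurd (this h.1 h.2.1) h.2.2
    · rfl
  · rw [if_neg he, upd_getD]
    by_cases hz : z' = z <;> by_cases hk : k' = k
    · subst hz; subst hk
      simp only [List.isEmpty_iff] at he
      simp [he, pvAMax]
    · simp [hz, hk]
    · simp [hz, hk]
    · simp [hz, hk]

theorem azStep_SInv {zones keys cam_data agg} (h : SInv zones keys agg) {z : Int} (hz : z ∈ zones)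
    {k : String} (hk : k ∈ keys) : SInv zones keys (azStep cam_data z agg k) := by
  unfold azStep
  by_cases he : (pvVals cam_data cam_data z k).isEmpty
  · rw [if_pos he]; exact h
  · rw [if_neg he]; exact upd_SInv h hz hk _

theorem azFoldK_getD (cam_data : List (String × List (Int × List (String × Int)))) (z : Int) (z' : Int) (k' : String) :
    ∀ (ks : List String) (agg : PySem.Dict Int (PySem.Dict String Int)),
    (((ks.foldl (azStep cam_data z) agg).getD z' PySem.Dict.empty).getD k' 0)
      = if z' = z ∧ k' ∈ ks ∧ pvVals cam_data cam_data z' k' ≠ [] then pvAMax cam_data z' k'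
        else (agg.getD z' PySem.Dict.empty).getD k' 0 := by
  intro ks
  induction ks with
  | nil => simp
  | cons a t ih =>
    intro agg
    rw [List.foldl_cons, ih, azStep_getD]
    by_cases hz : z' = z <;> by_cases hne : pvVals cam_data cam_data z' k' = [] <;>
      by_cases ha : k' = a <;> by_cases ht : k' ∈ t <;> simp [hz, hne, ha, ht] <;> tauto

theorem azFoldK_SInv {zones keys cam_data} {z : Int} (hz : z ∈ zones) :
    ∀ (ks : List String), (∀ k ∈ ks, k ∈ keys) → ∀ {agg}, SInv zones keys agg →
      SInv zones keys (ks.foldl (azStep cam_data z) agg) := by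
  intro ks
  induction ks with
  | nil => intro _ _ h; simpa using h
  | cons a t ih =>
    intro hsub agg h
    rw [List.foldl_cons]
    exact ih (fun k hk => hsub k (List.mem_cons_of_mem _ hk)) (azStep_SInv h hz (hsub a (List.mem_cons_self)))

theorem azFoldZ_getD (cam_data : List (String × List (Int × List (String × Int)))) (keys : List String) (z' : Int) (k' : String) :
    ∀ (zs : List Int) (agg : PySem.Dict Int (PySem.Dict String Int)),
    (((zs.foldl (fun a z => keys.foldl (azStep cam_data z) a) agg).getD z' PySem.Dict.empty).getD k' 0)
      = if z' ∈ zs ∧ k' ∈ keys ∧ pvVals cam_data cam_data z' k' ≠ [] then pvAMax cam_data z' k'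
        else (agg.getD z' PySem.Dict.empty).getD k' 0 := by
  intro zs
  induction zs with
  | nil => simp
  | cons a t ih =>
    intro agg
    rw [List.foldl_cons, ih, azFoldK_getD]
    by_cases hz : z' = a <;> by_cases ht : z' ∈ t <;> by_cases hk : k' ∈ keys <;>
      by_cases hne : pvVals cam_data cam_data z' k' = [] <;> simp [hz, ht, hk, hne] <;> tauto

theorem azMain_SInv (cam_data : List (String × List (Int × List (String × Int)))) (zones : List Int) (keys : List String) :
    SInv zones keys (azAggregateMax cam_data zones keys) := by
  unfold azAggregateMax
  suffices h : ∀ (zs : List Int), (∀ z ∈ zs, z ∈ zones) → ∀ {agg}, SInv zones keys agg →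
      SInv zones keys (zs.foldl (fun a z => keys.foldl (azStep cam_data z) a) agg) by
    exact h zones (fun _ hz => hz) (initAgg_SInv zones keys)
  intro zs
  induction zs with
  | nil => intro _ _ h; simpa using h
  | cons a t ih =>
    intro hsub agg h
    rw [List.foldl_cons]
    exact ih (fun z hz => hsub z (List.mem_cons_of_mem _ hz))
      (azFoldK_SInv (hsub a List.mem_cons_self) keys (fun _ hk => hk) h)

theorem azMain_getD (cam_data : List (String × List (Int × List (String × Int)))) (zones : List Int) (keys : List String)
    {z : Int} (hz : z ∈ zones) {k : String} (hk : k ∈ keys) :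
    ((azAggregateMax cam_data zones keys).getD z PySem.Dict.empty).getD k 0
      = if pvVals cam_data cam_data z k = [] then 0 else pvAMax cam_data z k := by
  unfold azAggregateMax
  rw [azFoldZ_getD, initAgg_getD, if_pos hz]
  by_cases hne : pvVals cam_data cam_data z k = [] <;> simp [hz, hk, hne, zeroRow_getD]

-- ---- B-side characterization ----
def pvRows (cam_data l : List (String × List (Int × List (String × Int)))) (z : Int) : List (List (String × Int)) :=
  l.filterMap (fun p => pvRow cam_data p.1 z)

def pvBV (cam_data l : List (String × List (Int × List (String × Int)))) (z : Int) (k : String) : Int :=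
  match pvVals cam_data l z k with
  | [] => 0
  | v :: t => t.foldl max v

theorem pvVals_eq_map (cam_data l : List (String × List (Int × List (String × Int)))) (z : Int) (k : String) :
    pvVals cam_data l z k = (pvRows cam_data l z).map (fun row => ((PySem.Dict.mk row).get? k).getD 0) := rfl

theorem pvRows_append (cam_data l l' : List (String × List (Int × List (String × Int)))) (z : Int) :
    pvRows cam_data (l ++ l') z = pvRows cam_data l z ++ pvRows cam_data l' z := by
  unfold pvRows; exact List.filterMap_append

-- seen-branch inner loop
theorem bSeen_getD (z : Int) (row : List (String × Int)) (z' : Int) (k' : String) :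
    ∀ (ks : List String) (agg : PySem.Dict Int (PySem.Dict String Int)),
    (((ks.foldl (fun agg k =>
         let v := ((PySem.Dict.mk row).get? k).getD 0
         if v > (agg.getD z PySem.Dict.empty).getD k 0 then
           agg.insert z ((agg.getD z PySem.Dict.empty).insert k v)
         else agg) agg).getD z' PySem.Dict.empty).getD k' 0)
      = if z' = z ∧ k' ∈ ks
          then max ((agg.getD z' PySem.Dict.empty).getD k' 0) (((PySem.Dict.mk row).get? k').getD 0)
          else (agg.getD z' PySem.Dict.empty).getD k' 0 := by
  intro ks
  induction ks with
  | nil => simp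
  | cons a t ih =>
    intro agg
    rw [List.foldl_cons, ih]
    have hstep : ∀ (z'' : Int) (k'' : String),
        (((if ((PySem.Dict.mk row).get? a).getD 0 > (agg.getD z PySem.Dict.empty).getD a 0 then
            agg.insert z ((agg.getD z PySem.Dict.empty).insert a (((PySem.Dict.mk row).get? a).getD 0))
          else agg).getD z'' PySem.Dict.empty).getD k'' 0)
        = if z'' = z ∧ k'' = a
            then max ((agg.getD z'' PySem.Dict.empty).getD k'' 0) (((PySem.Dict.mk row).get? a).getD 0)
            else (agg.getD z'' PySem.Dict.empty).getD k'' 0 := by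
      intro z'' k''
      by_cases hc : ((PySem.Dict.mk row).get? a).getD 0 > (agg.getD z PySem.Dict.empty).getD a 0
      · rw [if_pos hc, upd_getD]
        by_cases hz : z'' = z <;> by_cases hk : k'' = a
        · subst hz; subst hk; simp; omega
        · simp [hz, hk]
        · simp [hz, hk]
        · simp [hz, hk]
      · rw [if_neg hc]
        by_cases hz : z'' = z <;> by_cases hk : k'' = a
        · subst hz; subst hk; simp; omega
        · simp [hz, hk]
        · simp [hz, hk]
        · simp [hz, hk]
    rw [hstep]
    by_cases hz : z' = z <;> by_cases ha : k' = a <;> by_cases ht : k' ∈ t <;>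
      simp [hz, ha, ht]

-- unseen-branch inner loop
theorem bUnseen_getD (z : Int) (row : List (String × Int)) (z' : Int) (k' : String) :
    ∀ (ks : List String) (agg : PySem.Dict Int (PySem.Dict String Int)),
    (((ks.foldl (fun agg k =>
         agg.insert z ((agg.getD z PySem.Dict.empty).insert k (((PySem.Dict.mk row).get? k).getD 0))) agg).getD z' PySem.Dict.empty).getD k' 0)
      = if z' = z ∧ k' ∈ ks
          then ((PySem.Dict.mk row).get? k').getD 0
          else (agg.getD z' PySem.Dict.empty).getD k' 0 := by
  intro ks
  induction ks with
  | nil => simp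
  | cons a t ih =>
    intro agg
    rw [List.foldl_cons, ih, upd_getD]
    by_cases hz : z' = z <;> by_cases ha : k' = a <;> by_cases ht : k' ∈ t <;>
      simp [hz, ha, ht]

theorem bSeen_SInv {zones keys} {z : Int} (hz : z ∈ zones) (row : List (String × Int)) :
    ∀ (ks : List String), (∀ k ∈ ks, k ∈ keys) → ∀ {agg}, SInv zones keys agg →
      SInv zones keys (ks.foldl (fun agg k =>
         let v := ((PySem.Dict.mk row).get? k).getD 0
         if v > (agg.getD z PySem.Dict.empty).getD k 0 then
           agg.insert z ((agg.getD z PySem.Dict.empty).insert k v)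
         else agg) agg) := by
  intro ks
  induction ks with
  | nil => intro _ _ h; simpa using h
  | cons a t ih =>
    intro hsub agg h
    rw [List.foldl_cons]
    refine ih (fun k hk => hsub k (List.mem_cons_of_mem _ hk)) ?_
    by_cases hc : ((PySem.Dict.mk row).get? a).getD 0 > (agg.getD z PySem.Dict.empty).getD a 0
    · rw [if_pos hc]; exact upd_SInv h hz (hsub a List.mem_cons_self) _
    · rw [if_neg hc]; exact h

theorem bUnseen_SInv {zones keys} {z : Int} (hz : z ∈ zones) (row : List (String × Int)) :
    ∀ (ks : List String), (∀ k ∈ ks, k ∈ keys) → ∀ {agg}, SInv zones keys agg →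
      SInv zones keys (ks.foldl (fun agg k =>
         agg.insert z ((agg.getD z PySem.Dict.empty).insert k (((PySem.Dict.mk row).get? k).getD 0))) agg) := by
  intro ks
  induction ks with
  | nil => intro _ _ h; simpa using h
  | cons a t ih =>
    intro hsub agg h
    rw [List.foldl_cons]
    exact ih (fun k hk => hsub k (List.mem_cons_of_mem _ hk)) (upd_SInv h hz (hsub a List.mem_cons_self) _)

-- bzZoneStep: seen-set membership
theorem bzZoneStep_snd_mem (keys : List String) (zmap : List (Int × List (String × Int)))
    (st : PySem.Dict Int (PySem.Dict String Int) × PySem.Set Int) (z z0 : Int) :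
    (z0 ∈ (bzZoneStep keys zmap st z).2) ↔ z0 ∈ st.2 ∨ (z0 = z ∧ ((PySem.Dict.mk zmap).get? z).isSome) := by
  unfold bzZoneStep
  cases hrow : (PySem.Dict.mk zmap).get? z with
  | none => simp
  | some row =>
    by_cases hmem : z ∈ st.2
    · simp only [if_pos hmem]
      constructor
      · exact fun h => Or.inl h
      · rintro (h | ⟨rfl, _⟩)
        · exact h
        · exact hmem
    · simp only [if_neg hmem, PySem.Set.mem_add]
      simp

theorem bzZoneStep_SInv {zones keys} (zmap : List (Int × List (String × Int)))
    {st : PySem.Dict Int (PySem.Dict String Int) × PySem.Set Int} {z : Int} (hz : z ∈ zones)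
    (h : SInv zones keys st.1) : SInv zones keys (bzZoneStep keys zmap st z).1 := by
  unfold bzZoneStep
  cases hrow : (PySem.Dict.mk zmap).get? z with
  | none => exact h
  | some row =>
    by_cases hmem : z ∈ st.2
    · simp only [if_pos hmem]
      exact bSeen_SInv hz row keys (fun _ hk => hk) h
    · simp only [if_neg hmem]
      exact bUnseen_SInv hz row keys (fun _ hk => hk) h

-- fold of bzZoneStep over a zone list: seen-set membership
theorem bzFold_snd_mem (keys : List String) (zmap : List (Int × List (String × Int))) (z0 : Int) :
    ∀ (zs : List Int) (st : PySem.Dict Int (PySem.Dict String Int) × PySem.Set Int),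
    (z0 ∈ (zs.foldl (bzZoneStep keys zmap) st).2)
      ↔ z0 ∈ st.2 ∨ (z0 ∈ zs ∧ ((PySem.Dict.mk zmap).get? z0).isSome) := by
  intro zs
  induction zs with
  | nil => simp
  | cons a t ih =>
    intro st
    rw [List.foldl_cons, ih, bzZoneStep_snd_mem]
    constructor
    · rintro ((h | ⟨rfl, hs⟩) | ⟨ht, hs⟩)
      · exact Or.inl h
      · exact Or.inr ⟨List.mem_cons_self, hs⟩
      · exact Or.inr ⟨List.mem_cons_of_mem _ ht, hs⟩
    · rintro (h | ⟨hm, hs⟩)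
      · exact Or.inl (Or.inl h)
      · rcases List.mem_cons.mp hm with rfl | ht
        · exact Or.inl (Or.inr ⟨rfl, hs⟩)
        · exact Or.inr ⟨ht, hs⟩

theorem bzFold_SInv {zones keys} (zmap : List (Int × List (String × Int))) :
    ∀ (zs : List Int), (∀ z ∈ zs, z ∈ zones) →
    ∀ {st : PySem.Dict Int (PySem.Dict String Int) × PySem.Set Int}, SInv zones keys st.1 →
      SInv zones keys ((zs.foldl (bzZoneStep keys zmap) st)).1 := by
  intro zs
  induction zs with
  | nil => intro _ _ h; simpa using h
  | cons a t ih =>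
    intro hsub st h
    rw [List.foldl_cons]
    exact ih (fun z hz => hsub z (List.mem_cons_of_mem _ hz)) (bzZoneStep_SInv zmap (hsub a List.mem_cons_self) h)

-- fold of bzZoneStep: value at a cell the camera does not touch
theorem bzFold_getD_untouched (keys : List String) (zmap : List (Int × List (String × Int))) (z0 : Int) (k0 : String) :
    ∀ (zs : List Int) (st : PySem.Dict Int (PySem.Dict String Int) × PySem.Set Int),
    ((PySem.Dict.mk zmap).get? z0 = none ∨ z0 ∉ zs) →
    (((zs.foldl (bzZoneStep keys zmap) st).1.getD z0 PySem.Dict.empty).getD k0 0)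
      = ((st.1.getD z0 PySem.Dict.empty).getD k0 0) := by
  intro zs
  induction zs with
  | nil => simp
  | cons a t ih =>
    intro st h
    have ht : (PySem.Dict.mk zmap).get? z0 = none ∨ z0 ∉ t := by
      rcases h with h | h
      · exact Or.inl h
      · exact Or.inr (fun hm => h (List.mem_cons_of_mem _ hm))
    rw [List.foldl_cons, ih _ ht]
    unfold bzZoneStep
    cases hrow : (PySem.Dict.mk zmap).get? a with
    | none => rfl
    | some row =>
      have hza : z0 ≠ a := by
        rintro rfl
        rcases h with h | h
        · rw [h] at hrow; cases hrow
        · exact h List.mem_cons_self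
      by_cases hmem : a ∈ st.2
      · simp only [if_pos hmem]
        rw [bSeen_getD]
        simp [hza]
      · simp only [if_neg hmem]
        rw [bUnseen_getD]
        simp [hza]

-- fold of bzZoneStep: value at a cell the camera covers
theorem bzFold_getD_touched {zones : List Int} (keys : List String) (zmap : List (Int × List (String × Int)))
    {z0 : Int} (hz0 : z0 ∈ zones) {k0 : String} (hk0 : k0 ∈ keys) (row : List (String × Int))
    (hrow : (PySem.Dict.mk zmap).get? z0 = some row) :
    ∀ (zs : List Int), z0 ∈ zs → (∀ z ∈ zs, z ∈ zones) →
    ∀ (st : PySem.Dict Int (PySem.Dict String Int) × PySem.Set Int), SInv zones keys st.1 →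
    (((zs.foldl (bzZoneStep keys zmap) st).1.getD z0 PySem.Dict.empty).getD k0 0)
      = (if z0 ∈ st.2
          then max ((st.1.getD z0 PySem.Dict.empty).getD k0 0) (((PySem.Dict.mk row).get? k0).getD 0)
          else ((PySem.Dict.mk row).get? k0).getD 0) := by
  intro zs
  induction zs with
  | nil => intro h; cases h
  | cons a t ih =>
    intro hmem hsub st hS
    rw [List.foldl_cons]
    by_cases hza : a = z0
    · subst hza
      -- the head step applies the camera's row at z0
      have hstep : (bzZoneStep keys zmap st a) =
          (if a ∈ st.2 then
            (keys.foldl (fun agg k =>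
               let v := ((PySem.Dict.mk row).get? k).getD 0
               if v > (agg.getD a PySem.Dict.empty).getD k 0 then
                 agg.insert a ((agg.getD a PySem.Dict.empty).insert k v)
               else agg) st.1, st.2)
          else
            (keys.foldl (fun agg k =>
               agg.insert a ((agg.getD a PySem.Dict.empty).insert k (((PySem.Dict.mk row).get? k).getD 0))) st.1,
             PySem.Set.add st.2 a)) := by
        unfold bzZoneStep; rw [hrow]
      by_cases hseen : a ∈ st.2
      · rw [hstep, if_pos hseen]
        set st1 := (keys.foldl (fun agg k =>
               let v := ((PySem.Dict.mk row).get? k).getD 0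
               if v > (agg.getD a PySem.Dict.empty).getD k 0 then
                 agg.insert a ((agg.getD a PySem.Dict.empty).insert k v)
               else agg) st.1, st.2) with hst1
        have hv1 : (st1.1.getD a PySem.Dict.empty).getD k0 0
            = max ((st.1.getD a PySem.Dict.empty).getD k0 0) (((PySem.Dict.mk row).get? k0).getD 0) := by
          rw [hst1]; rw [bSeen_getD]; simp [hk0]
        have hS1 : SInv zones keys st1.1 := by
          rw [hst1]; exact bSeen_SInv hz0 row keys (fun _ hk => hk) hS
        by_cases hmt : a ∈ t
        · rw [ih hmt (fun z hz => hsub z (List.mem_cons_of_mem _ hz)) st1 hS1]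
          have : a ∈ st1.2 := hseen
          rw [if_pos this, if_pos hseen, hv1]
          omega
        · rw [bzFold_getD_untouched _ _ _ _ _ _ (Or.inr hmt), hv1, if_pos hseen]
      · rw [hstep, if_neg hseen]
        set st1 := (keys.foldl (fun agg k =>
               agg.insert a ((agg.getD a PySem.Dict.empty).insert k (((PySem.Dict.mk row).get? k).getD 0))) st.1,
             PySem.Set.add st.2 a) with hst1
        have hv1 : (st1.1.getD a PySem.Dict.empty).getD k0 0 = ((PySem.Dict.mk row).get? k0).getD 0 := by
          rw [hst1]; rw [bUnseen_getD]; simp [hk0]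
        have hS1 : SInv zones keys st1.1 := by
          rw [hst1]; exact bUnseen_SInv hz0 row keys (fun _ hk => hk) hS
        by_cases hmt : a ∈ t
        · rw [ih hmt (fun z hz => hsub z (List.mem_cons_of_mem _ hz)) st1 hS1]
          have : a ∈ st1.2 := by rw [hst1]; simp [PySem.Set.mem_add]
          rw [if_pos this, if_neg hseen, hv1]
          omega
        · rw [bzFold_getD_untouched _ _ _ _ _ _ (Or.inr hmt), hv1, if_neg hseen]
    · -- head step at a different zone: the z0 cell and z0's seen flag are unchanged
      have hmt : z0 ∈ t := by
        rcases List.mem_cons.mp hmem with rfl | h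
        · exact absurd rfl hza
        · exact h
      have hne : z0 ≠ a := fun h => hza h.symm
      have hS1 : SInv zones keys (bzZoneStep keys zmap st a).1 :=
        bzZoneStep_SInv zmap (hsub a List.mem_cons_self) hS
      rw [ih hmt (fun z hz => hsub z (List.mem_cons_of_mem _ hz)) _ hS1]
      have hseen_eq : (z0 ∈ (bzZoneStep keys zmap st a).2) ↔ z0 ∈ st.2 := by
        rw [bzZoneStep_snd_mem]
        constructor
        · rintro (h | ⟨rfl, _⟩)
          · exact h
          · exact absurd rfl hne
        · exact fun h => Or.inl h
      have hval_eq : ((bzZoneStep keys zmap st a).1.getD z0 PySem.Dict.empty).getD k0 0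
          = (st.1.getD z0 PySem.Dict.empty).getD k0 0 := by
        unfold bzZoneStep
        cases hrowa : (PySem.Dict.mk zmap).get? a with
        | none => rfl
        | some rowa =>
          by_cases hmem2 : a ∈ st.2
          · simp only [if_pos hmem2]; rw [bSeen_getD]; simp [hne]
          · simp only [if_neg hmem2]; rw [bUnseen_getD]; simp [hne]
      by_cases hs : z0 ∈ st.2
      · rw [if_pos (hseen_eq.mpr hs), if_pos hs, hval_eq]
      · rw [if_neg (fun h => hs (hseen_eq.mp h)), if_neg hs]

-- ---- the running maximum over an extended value list ----
theorem pvBV_append_some (cam_data l : List (String × List (Int × List (String × Int)))) (z : Int) (k : String)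
    (p : String × List (Int × List (String × Int))) (row : List (String × Int))
    (hrow : pvRow cam_data p.1 z = some row) :
    pvBV cam_data (l ++ [p]) z k
      = (if pvVals cam_data l z k = [] then ((PySem.Dict.mk row).get? k).getD 0
         else max (pvBV cam_data l z k) (((PySem.Dict.mk row).get? k).getD 0)) := by
  have hv : pvVals cam_data (l ++ [p]) z k = pvVals cam_data l z k ++ [((PySem.Dict.mk row).get? k).getD 0] := by
    rw [pvVals_eq_map, pvVals_eq_map, pvRows_append]
    simp [pvRows, hrow]
  unfold pvBV
  rw [hv]
  cases hvl : pvVals cam_data l z k with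
  | nil => simp
  | cons v t => simp [List.foldl_append, Int.max_def]

theorem pvBV_append_none (cam_data l : List (String × List (Int × List (String × Int)))) (z : Int) (k : String)
    (p : String × List (Int × List (String × Int))) (hrow : pvRow cam_data p.1 z = none) :
    pvBV cam_data (l ++ [p]) z k = pvBV cam_data l z k := by
  unfold pvBV
  rw [pvVals_eq_map, pvVals_eq_map, pvRows_append]
  simp [pvRows, hrow]

theorem pvRows_append_ne_nil (cam_data l : List (String × List (Int × List (String × Int)))) (z : Int)
    (p : String × List (Int × List (String × Int))) :
    (pvRows cam_data (l ++ [p]) z ≠ []) ↔ (pvRows cam_data l z ≠ [] ∨ (pvRow cam_data p.1 z).isSome) := by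
  rw [pvRows_append]
  cases hrow : pvRow cam_data p.1 z <;> simp [pvRows, hrow]

theorem pvRows_nil_iff_vals_nil (cam_data l : List (String × List (Int × List (String × Int)))) (z : Int) (k : String) :
    pvRows cam_data l z = [] ↔ pvVals cam_data l z k = [] := by
  rw [pvVals_eq_map]
  simp

-- ---- the full B loop invariant ----
def BInv (cam_data : List (String × List (Int × List (String × Int)))) (zones : List Int) (keys : List String)
    (l : List (String × List (Int × List (String × Int))))
    (st : PySem.Dict Int (PySem.Dict String Int) × PySem.Set Int) : Prop :=
  SInv zones keys st.1 ∧
  (∀ z0 : Int, z0 ∈ st.2 ↔ (z0 ∈ zones ∧ pvRows cam_data l z0 ≠ [])) ∧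
  (∀ z0 ∈ zones, ∀ k0 ∈ keys, (st.1.getD z0 PySem.Dict.empty).getD k0 0 = pvBV cam_data l z0 k0)

theorem BInv_step (cam_data : List (String × List (Int × List (String × Int)))) (zones : List Int) (keys : List String)
    (l : List (String × List (Int × List (String × Int)))) (p : String × List (Int × List (String × Int)))
    (st : PySem.Dict Int (PySem.Dict String Int) × PySem.Set Int) (h : BInv cam_data zones keys l st) :
    BInv cam_data zones keys (l ++ [p])
      (zones.foldl (bzZoneStep keys (((PySem.Dict.mk cam_data).get? p.1).getD [])) st) := by
  obtain ⟨hS, hseen, hval⟩ := h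
  have hrow_eq : ∀ z : Int, (PySem.Dict.mk (((PySem.Dict.mk cam_data).get? p.1).getD [])).get? z = pvRow cam_data p.1 z :=
    fun _ => rfl
  refine ⟨bzFold_SInv _ zones (fun _ hz => hz) hS, ?_, ?_⟩
  · intro z0
    rw [bzFold_snd_mem, hseen z0, hrow_eq, pvRows_append_ne_nil]
    constructor
    · rintro (⟨hz, hr⟩ | ⟨hz, hs⟩)
      · exact ⟨hz, Or.inl hr⟩
      · exact ⟨hz, Or.inr hs⟩
    · rintro ⟨hz, hr | hs⟩
      · exact Or.inl ⟨hz, hr⟩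
      · exact Or.inr ⟨hz, hs⟩
  · intro z0 hz0 k0 hk0
    cases hrow : pvRow cam_data p.1 z0 with
    | none =>
      rw [bzFold_getD_untouched _ _ _ _ _ _ (Or.inl ((hrow_eq z0).trans hrow)),
        hval z0 hz0 k0 hk0, pvBV_append_none _ _ _ _ _ hrow]
    | some row =>
      rw [bzFold_getD_touched keys _ hz0 hk0 row ((hrow_eq z0).trans hrow) zones hz0 (fun _ hz => hz) st hS]
      rw [pvBV_append_some _ _ _ _ _ _ hrow]
      by_cases hvl : pvVals cam_data l z0 k0 = []
      · have : z0 ∉ st.2 := by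
          rw [hseen z0]
          rintro ⟨_, hr⟩
          exact hr ((pvRows_nil_iff_vals_nil cam_data l z0 k0).mpr hvl)
        rw [if_neg this, if_pos hvl]
      · have : z0 ∈ st.2 := by
          rw [hseen z0]
          exact ⟨hz0, fun hr => hvl ((pvVals_eq_map cam_data l z0 k0).trans (by rw [hr]; rfl))⟩
        rw [if_pos this, if_neg hvl, hval z0 hz0 k0 hk0]

theorem BInv_fold (cam_data : List (String × List (Int × List (String × Int)))) (zones : List Int) (keys : List String) :
    ∀ (l2 l : List (String × List (Int × List (String × Int))))
      (st : PySem.Dict Int (PySem.Dict String Int) × PySem.Set Int), BInv cam_data zones keys l st →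
    BInv cam_data zones keys (l ++ l2)
      (l2.foldl (fun st p => zones.foldl (bzZoneStep keys (((PySem.Dict.mk cam_data).get? p.1).getD [])) st) st) := by
  intro l2
  induction l2 with
  | nil => intro l st h; simpa using h
  | cons p t ih =>
    intro l st h
    rw [List.foldl_cons]
    have := ih (l ++ [p]) _ (BInv_step cam_data zones keys l p st h)
    simpa using this

theorem bzMain_BInv (cam_data : List (String × List (Int × List (String × Int)))) (zones : List Int) (keys : List String) :
    BInv cam_data zones keys cam_data (bzMain cam_data zones keys) := by
  have hinit : BInv cam_data zones keys [] (pvInitAgg zones keys, ([] : PySem.Set Int)) := by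
    refine ⟨initAgg_SInv zones keys, ?_, ?_⟩
    · intro z0; simp [pvRows]
    · intro z0 hz0 k0 hk0
      simp only [initAgg_getD, if_pos hz0, zeroRow_getD]
      rfl
  have := BInv_fold cam_data zones keys cam_data [] _ hinit
  simpa [bzMain] using this

-- ---- equality of the two aggregation dictionaries ----
theorem dictEqOf {κ ν : Type} [BEq κ] [LawfulBEq κ] (d d' : PySem.Dict κ ν) (dflt : ν)
    (hnd : d.keys.Nodup) (hk : d.keys = d'.keys) (h : ∀ k, d.getD k dflt = d'.getD k dflt) : d = d' := by
  apply PySem.Dict.ext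
  rw [PySem.Dict.items_eq_map_keys d hnd dflt, PySem.Dict.items_eq_map_keys d' (hk ▸ hnd) dflt, hk]
  exact List.map_congr_left (fun k _ => by rw [h k])

theorem pvAMax_eq_pvBV (cam_data : List (String × List (Int × List (String × Int)))) (z : Int) (k : String)
    (h : pvVals cam_data cam_data z k ≠ []) : pvAMax cam_data z k = pvBV cam_data cam_data z k := by
  unfold pvAMax pvBV
  cases hv : pvVals cam_data cam_data z k with
  | nil => exact absurd hv h
  | cons v t => rw [PySem.List.max?_id_cons]; rfl

theorem main_eq (cam_data : List (String × List (Int × List (String × Int)))) (zones : List Int) (keys : List String) :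
    azAggregateMax cam_data zones keys = (bzMain cam_data zones keys).1 := by
  have hA := azMain_SInv cam_data zones keys
  obtain ⟨hBS, _, hBval⟩ := bzMain_BInv cam_data zones keys
  refine dictEqOf _ _ PySem.Dict.empty (by rw [hA.1]; exact PySem.Set.nodup_ofList zones)
    (by rw [hA.1, hBS.1]) (fun z => ?_)
  by_cases hz : z ∈ zones
  · refine dictEqOf _ _ 0 (by rw [hA.2 z, if_pos hz]; exact PySem.Set.nodup_ofList keys)
      (by rw [hA.2 z, hBS.2 z]) (fun k => ?_)
    by_cases hk : k ∈ keys
    · rw [azMain_getD cam_data zones keys hz hk, hBval z hz k hk]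
      by_cases hvl : pvVals cam_data cam_data z k = []
      · rw [if_pos hvl]
        unfold pvBV
        rw [hvl]
      · rw [if_neg hvl, pvAMax_eq_pvBV cam_data z k hvl]
    · rw [PySem.Dict.getD_of_not_contains _ _ (inner_not_contains_of_SInv hA z hk),
        PySem.Dict.getD_of_not_contains _ _ (inner_not_contains_of_SInv hBS z hk)]
  · rw [PySem.Dict.getD_of_not_contains _ _ (not_contains_of_SInv hA hz),
      PySem.Dict.getD_of_not_contains _ _ (not_contains_of_SInv hBS hz)]

theorem contains_main (cam_data : List (String × List (Int × List (String × Int)))) (zones : List Int) (keys : List String)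
    (z : Int) (hz : z ∈ zones) : (azAggregateMax cam_data zones keys).contains z = true :=
  contains_of_SInv (azMain_SInv cam_data zones keys) hz

theorem insert_comm_of_contains {κ ν : Type} [BEq κ] [LawfulBEq κ] (d : PySem.Dict κ ν) {k k' : κ} (a b : ν)
    (hk : d.contains k = true) (hk' : d.contains k' = true) (hne : k ≠ k') :
    (d.insert k a).insert k' b = (d.insert k' b).insert k a := by
  have c1 : (d.insert k a).contains k' = true := by rw [PySem.Dict.contains_insert]; simp [hk']
  have c2 : (d.insert k' b).contains k = true := by rw [PySem.Dict.contains_insert]; simp [hk]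
  apply PySem.Dict.ext
  rw [PySem.Dict.items_insert_of_contains _ b c1, PySem.Dict.items_insert_of_contains _ a hk,
      PySem.Dict.items_insert_of_contains _ a c2, PySem.Dict.items_insert_of_contains _ b hk']
  rw [List.map_map, List.map_map]
  apply List.map_congr_left
  intro p _
  by_cases hp1 : p.1 = k <;> by_cases hp2 : p.1 = k' <;>
    simp [Function.comp, hp1, hp2, hne, Ne.symm hne]

theorem cross_chains (agg : PySem.Dict Int (PySem.Dict String Int))
    (h2 : agg.contains 2 = true) (K1 K2 J1 J2 : PySem.Dict String Int) :
    (((agg.insert 1 K1).insert 2 K2).insert 1 J1).insert 2 J2 = (agg.insert 1 J1).insert 2 J2 := by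
  have cX1 : (agg.insert 1 K1).contains 1 = true := by rw [PySem.Dict.contains_insert]; simp
  have cX2 : (agg.insert 1 K1).contains 2 = true := by rw [PySem.Dict.contains_insert]; simp [h2]
  rw [insert_comm_of_contains (agg.insert 1 K1) K2 J1 cX2 cX1 (by decide),
    PySem.Dict.insert_insert_self, PySem.Dict.insert_insert_self]

theorem cross_eq (keys : List String) (agg : PySem.Dict Int (PySem.Dict String Int))
    (h1 : agg.contains 1 = true) (h2 : agg.contains 2 = true) :
    azCross keys agg = bzCross agg := by
  have hc1 : ∀ (r : PySem.Dict String Int), (agg.insert 1 r).contains 2 = true := by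
    intro r; rw [PySem.Dict.contains_insert]; simp [h2]
  unfold azCross bzCross
  simp only [pvPersonKeys, List.foldl_cons, List.foldl_nil, h1, hc1,
    PySem.Dict.getD_insert, PySem.Dict.insert_insert_self, if_true, if_false,
    show (((2:Int) = 1) = False) from by simp, show (((1:Int) = 2) = False) from by simp,
    show (("person_with_helmet" = "person_no_helmet") = False) from by simp,
    show (("person_no_helmet" = "person_with_helmet") = False) from by simp]
  rw [cross_chains agg h2]



-- ===== VERDICT (by name: the statement is the Claim_ definition above) =====
theorem aggregate_max_cross_zone_spec : Claim_equal_aggregate_max_cross_zone := by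
  intro cam_data zones keys _hDom _hPre
  unfold Spec_aggregate_max_cross_zone aggregate_max_cross_zone aggregate_max_cross_zone_alt
  rw [← main_eq]
  by_cases h : (1 : Int) ∈ zones ∧ (2 : Int) ∈ zones
  · simp only [if_pos h]
    rw [cross_eq keys _ (contains_main cam_data zones keys 1 h.1) (contains_main cam_data zones keys 2 h.2)]
  · simp only [if_neg h]
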